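-- pv_equiv track=rewrite | github.com/nssingh-ml/randomness | diehardtest/DiehardCraps.py | _simulate_craps
-- ===== SOURCE A (Python) =====
-- def _simulate_craps(data):
--     """
--     Simulates a craps game using the provided data.
--
--     :param data: List of integers.
--     :return: Tuple (wins, losses).
--     """
--     wins = 0
--     losses = 0
--     index = 0
--
--     while index + 1 < len(data):
--         roll1 = data[index] % 6 + 1  # First die roll
--         roll2 = data[index + 1] % 6 + 1  # Second die roll
--         sum_roll = roll1 + roll2
--         index += 2
--
--         if sum_roll in [7, 11]:
--             wins += 1
--         elif sum_roll in [2, 3, 12]: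
--             losses += 1
--         else:
--             point = sum_roll
--             while index + 1 < len(data):
--                 roll1 = data[index] % 6 + 1
--                 roll2 = data[index + 1] % 6 + 1
--                 sum_roll = roll1 + roll2
--                 index += 2
--
--                 if sum_roll == 7:
--                     losses += 1
--                     break
--                 elif sum_roll == point:
--                     wins += 1
--                     break
--
--     return wins, losses
-- ===== SOURCE B (Python) =====
-- def _simulate_craps(data):
--     """
--     Simulates a craps game using the provided data.
--
--     :param data: List of integers.
--     :return: Tuple (wins, losses).
--     """
--     sums = [data[i] % 6 + data[i + 1] % 6 + 2 for i in range(0, len(data) - 1, 2)]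
--     wins = 0
--     losses = 0
--     point = None
--     for s in sums:
--         if point is None:
--             if s in (7, 11):
--                 wins += 1
--             elif s in (2, 3, 12):
--                 losses += 1
--             else:
--                 point = s
--         elif s == 7:
--             losses += 1
--             point = None
--         elif s == point:
--             wins += 1
--             point = None
--     return wins, losses
-- ===== Notes on version B (the rewrite author's own statement) =====
-- stated objective: simpler
-- what changed: Replaces A's nested while-loops with index bookkeeping by first materialising the list of pair sums in a comprehension and then running one flat loop with an explicit point-state variable (point=None for come-out).
import Mathlib
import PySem

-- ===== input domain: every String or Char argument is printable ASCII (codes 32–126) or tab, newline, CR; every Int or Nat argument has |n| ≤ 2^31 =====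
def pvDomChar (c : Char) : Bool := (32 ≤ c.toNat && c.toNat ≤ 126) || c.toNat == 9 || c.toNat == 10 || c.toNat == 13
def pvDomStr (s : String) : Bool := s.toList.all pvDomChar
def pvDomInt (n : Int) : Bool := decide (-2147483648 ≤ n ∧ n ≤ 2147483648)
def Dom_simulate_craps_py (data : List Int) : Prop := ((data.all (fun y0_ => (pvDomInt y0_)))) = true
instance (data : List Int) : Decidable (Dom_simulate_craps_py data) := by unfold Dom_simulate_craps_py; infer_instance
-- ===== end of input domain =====

-- B replaces A's nested while-loops over an index with a flat state machine over
-- the precomputed list of pair sums (objective: simpler); proved equal on all inputs.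


-- ===== PORT A =====
-- A's outer while-loop (come-out phase); the inner while-loop (point phase) is
-- crapsInner; 'break' returns control to the outer loop = a call back to crapsOuter.
mutual
def crapsOuter : List Int → Int → Int → Int × Int
  | x1 :: x2 :: rest, wins, losses =>
    let sum_roll := PySem.Int.mod x1 6 + 1 + (PySem.Int.mod x2 6 + 1)
    if sum_roll = 7 ∨ sum_roll = 11 then crapsOuter rest (wins + 1) losses
    else if sum_roll = 2 ∨ sum_roll = 3 ∨ sum_roll = 12 then crapsOuter rest wins (losses + 1)
    else crapsInner sum_roll rest wins losses
  | _, wins, losses => (wins, losses)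
termination_by data _ _ => data.length
def crapsInner : Int → List Int → Int → Int → Int × Int
  | point, x1 :: x2 :: rest, wins, losses =>
    let sum_roll := PySem.Int.mod x1 6 + 1 + (PySem.Int.mod x2 6 + 1)
    if sum_roll = 7 then crapsOuter rest wins (losses + 1)
    else if sum_roll = point then crapsOuter rest (wins + 1) losses
    else crapsInner point rest wins losses
  | _, _, wins, losses => (wins, losses)
termination_by _ data _ _ => data.length
end

def simulate_craps_py (data : List Int) : Int × Int := crapsOuter data 0 0

-- ===== PORT B =====
-- body of B's single 'for s in sums' loop; state = (point, wins, losses)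
def crapsStep (st : Option Int × Int × Int) (s : Int) : Option Int × Int × Int :=
  match st with
  | (none, wins, losses) =>
    if s = 7 ∨ s = 11 then (none, wins + 1, losses)
    else if s = 2 ∨ s = 3 ∨ s = 12 then (none, wins, losses + 1)
    else (some s, wins, losses)
  | (some point, wins, losses) =>
    if s = 7 then (none, wins, losses + 1)
    else if s = point then (none, wins + 1, losses)
    else (some point, wins, losses)

def simulate_craps_py_alt (data : List Int) : Int × Int :=
  -- sums = [data[i] % 6 + data[i+1] % 6 + 2 for i in range(0, len(data)-1, 2)]
  -- (pyGetD is exact here: every sampled index is in range)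
  let sums := (PySem.List.pyRange 0 ((data.length : Int) - 1) 2).map
    (fun i => PySem.Int.mod (PySem.List.pyGetD data i 0) 6
              + PySem.Int.mod (PySem.List.pyGetD data (i + 1) 0) 6 + 2)
  let st := sums.foldl crapsStep (none, 0, 0)
  (st.2.1, st.2.2)

-- ===== PRECONDITION & SPEC =====
def Spec_simulate_craps_py (data : List Int) (out : Int × Int) : Prop := out = simulate_craps_py_alt data
instance (data : List Int) (out : Int × Int) : Decidable (Spec_simulate_craps_py data out) := by unfold Spec_simulate_craps_py; infer_instance

-- ===== CLAIM (what is proved, stated in full; the proofs are below) =====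
def Claim_equal_simulate_craps_py : Prop := ∀ (data : List Int), Dom_simulate_craps_py data → Spec_simulate_craps_py data (simulate_craps_py data)

-- ===== LEMMAS AND PROOFS =====

-- proof-side view of B's sums list: one sum per non-overlapping pair
def pairSums : List Int → List Int
  | x1 :: x2 :: rest =>
    (PySem.Int.mod x1 6 + PySem.Int.mod x2 6 + 2) :: pairSums rest
  | _ => []

lemma range_pairSums (data : List Int) :
    (List.range (data.length / 2)).map
      (fun k => PySem.Int.mod (data.getD (2 * k) 0) 6
                + PySem.Int.mod (data.getD (2 * k + 1) 0) 6 + 2)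
      = pairSums data := by
  induction data using pairSums.induct with
  | case1 x1 x2 rest ih =>
    have hlen : (x1 :: x2 :: rest).length / 2 = rest.length / 2 + 1 := by
      simp [List.length]; omega
    rw [hlen, List.range_succ_eq_map, List.map_cons, List.map_map]
    simp only [pairSums]
    congr 1   -- head is rfl; tail is ih up to defeq (getD shifts by two under the cons-cons)
  | case2 data h =>
    rcases data with _ | ⟨x, _ | ⟨y, rest⟩⟩
    · simp [pairSums]
    · simp [pairSums]
    · exact (h x y rest rfl).elim

lemma sums_eq (data : List Int) :
    (PySem.List.pyRange 0 ((data.length : Int) - 1) 2).map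
      (fun i => PySem.Int.mod (PySem.List.pyGetD data i 0) 6
                + PySem.Int.mod (PySem.List.pyGetD data (i + 1) 0) 6 + 2)
      = pairSums data := by
  rw [PySem.List.pyRange_of_pos 0 _ (by norm_num), List.map_map]
  have hcount : (if (0:Int) < (data.length : Int) - 1 then
      (((data.length : Int) - 1 - 0 + 2 - 1) / 2).toNat else 0) = data.length / 2 := by
    split_ifs with h <;> omega
  rw [hcount, ← range_pairSums]
  apply List.map_congr_left
  intro k _
  have h1 : (0:Int) + 2 * (k : Int) = ((2 * k : Nat) : Int) := by push_cast; ring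
  simp only [Function.comp_apply, h1]
  have h2 : ((2 * k : Nat) : Int) + 1 = ((2 * k + 1 : Nat) : Int) := by push_cast; ring
  rw [h2, PySem.List.pyGetD_natCast, PySem.List.pyGetD_natCast]

lemma fold_both : ∀ (n : Nat) (l : List Int), l.length ≤ n →
    (∀ w lo : Int,
      ((((pairSums l).foldl crapsStep (none, w, lo)).2.1,
        ((pairSums l).foldl crapsStep (none, w, lo)).2.2) = crapsOuter l w lo)) ∧
    (∀ (p w lo : Int),
      ((((pairSums l).foldl crapsStep (some p, w, lo)).2.1,
        ((pairSums l).foldl crapsStep (some p, w, lo)).2.2) = crapsInner p l w lo)) := by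
  intro n
  induction n with
  | zero =>
    intro l hl
    have hnil : l = [] := List.length_eq_zero_iff.mp (Nat.le_zero.mp hl)
    subst hnil
    exact ⟨fun w lo => by simp [pairSums, crapsOuter],
           fun p w lo => by simp [pairSums, crapsInner]⟩
  | succ n ih =>
    intro l hl
    match l with
    | [] =>
      exact ⟨fun w lo => by simp [pairSums, crapsOuter],
             fun p w lo => by simp [pairSums, crapsInner]⟩
    | [x] =>
      exact ⟨fun w lo => by simp [pairSums, crapsOuter],
             fun p w lo => by simp [pairSums, crapsInner]⟩
    | x1 :: x2 :: rest =>
      have hrest : rest.length ≤ n := by simp at hl; omega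
      have hs : PySem.Int.mod x1 6 + 1 + (PySem.Int.mod x2 6 + 1)
          = PySem.Int.mod x1 6 + PySem.Int.mod x2 6 + 2 := by ring
      constructor
      · intro w lo
        simp only [crapsOuter, hs, pairSums, List.foldl_cons, crapsStep]
        split_ifs with h1 h2
        · exact (ih rest hrest).1 (w + 1) lo
        · exact (ih rest hrest).1 w (lo + 1)
        · exact (ih rest hrest).2 _ w lo
      · intro p w lo
        simp only [crapsInner, hs, pairSums, List.foldl_cons, crapsStep]
        split_ifs with h1 h2
        · exact (ih rest hrest).1 w (lo + 1)
        · exact (ih rest hrest).1 (w + 1) lo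
        · exact (ih rest hrest).2 p w lo

-- ===== VERDICT (by name: the statement is the Claim_ definition above) =====
theorem simulate_craps_py_spec : Claim_equal_simulate_craps_py := by
  intro data _
  unfold Spec_simulate_craps_py simulate_craps_py simulate_craps_py_alt
  simp only [sums_eq]
  exact ((fold_both data.length data le_rfl).1 0 0).symm
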